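-- pv_equiv track=rewrite | github.com/binarybottle/optimize_layouts | keyboards/display_layouts.py | convert_moo_to_qwerty_layout
-- ===== SOURCE A (Python) =====
-- QWERTY_ORDER = "QWERTYUIOPASDFGHJKL;ZXCVBNM,./['"
--
-- def convert_moo_to_qwerty_layout(items, positions):
--     """
--     Convert MOO format to QWERTY layout string.
--
--     Args:
--         items: Letters in assignment order (e.g., "etaoinsrhldcum")
--         positions: QWERTY positions where those letters go (e.g., "KJ;ASDVRLFUEIM")
--
--     Returns:
--         Layout string in QWERTY key order (e.g., "  cr  du  oinl  teha   s  m     ")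
--     """
--     # Create mapping from position to letter
--     pos_to_letter = dict(zip(positions, items))
--
--     # Build layout string in QWERTY order
--     layout_chars = []
--     for qwerty_pos in QWERTY_ORDER:
--         if qwerty_pos in pos_to_letter:
--             layout_chars.append(pos_to_letter[qwerty_pos])
--         else:
--             layout_chars.append(' ')  # Use space for unassigned positions
--
--     return ''.join(layout_chars)
-- ===== SOURCE B (Python) =====
-- QWERTY_ORDER = "QWERTYUIOPASDFGHJKL;ZXCVBNM,./['"
--
-- def convert_moo_to_qwerty_layout(items, positions):
--     # Scatter: preallocate the output and assign letters into fixed slots,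
--     # instead of gathering per QWERTY position via a position->letter dict.
--     idx = {c: i for i, c in enumerate(QWERTY_ORDER)}
--     layout = [' '] * len(QWERTY_ORDER)
--     for pos, letter in zip(positions, items):
--         if pos in idx:
--             layout[idx[pos]] = letter
--     return ''.join(layout)
-- ===== Notes on version B (the rewrite author's own statement) =====
-- stated objective: alternative
-- what changed: B scatters letters into a preallocated 32-slot array via a precomputed char->index map over zip(positions,items), instead of A's gather loop over QWERTY_ORDER reading a position->letter dict.
import Mathlib
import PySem

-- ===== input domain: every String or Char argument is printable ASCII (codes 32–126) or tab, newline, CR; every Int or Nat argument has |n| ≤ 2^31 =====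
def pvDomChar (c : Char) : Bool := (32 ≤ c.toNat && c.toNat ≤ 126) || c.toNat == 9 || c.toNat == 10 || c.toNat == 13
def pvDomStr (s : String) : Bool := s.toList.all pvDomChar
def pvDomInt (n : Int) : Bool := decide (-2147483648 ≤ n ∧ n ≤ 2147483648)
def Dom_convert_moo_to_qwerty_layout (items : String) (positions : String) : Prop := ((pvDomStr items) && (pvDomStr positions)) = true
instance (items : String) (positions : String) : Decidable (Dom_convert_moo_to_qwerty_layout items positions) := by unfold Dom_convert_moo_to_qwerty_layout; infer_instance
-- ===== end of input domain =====

-- B scatters letters into a preallocated array via a char->index map (assignment order),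
-- instead of A's gather loop over QWERTY_ORDER reading a position->letter dict; same cost, different decomposition.

-- ===== PORT A =====
def pvQwertyOrder : List Char := "QWERTYUIOPASDFGHJKL;ZXCVBNM,./['".toList

def convert_moo_to_qwerty_layout (items : String) (positions : String) : String :=
  -- pos_to_letter = dict(zip(positions, items))
  let pos_to_letter : PySem.Dict Char Char :=
    (positions.toList.zip items.toList).foldl (fun d p => d.insert p.1 p.2) PySem.Dict.empty
  -- for qwerty_pos in QWERTY_ORDER: append letter or ' '
  let layout_chars : List Char :=
    pvQwertyOrder.foldl (fun acc q =>
      acc ++ [if pos_to_letter.contains q then pos_to_letter.getD q ' ' else ' ']) []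
  String.mk layout_chars

-- ===== PORT B =====
def convert_moo_to_qwerty_layout_alt (items : String) (positions : String) : String :=
  -- idx = {c: i for i, c in enumerate(QWERTY_ORDER)}
  let idx : PySem.Dict Char Int :=
    (PySem.List.enumerate pvQwertyOrder).foldl (fun m p => m.insert p.2 p.1) PySem.Dict.empty
  -- layout = [' '] * len(QWERTY_ORDER); scatter over zip(positions, items)
  let layout : List Char :=
    (positions.toList.zip items.toList).foldl
      (fun acc p => if idx.contains p.1 then acc.set (idx.getD p.1 0).toNat p.2 else acc)
      (List.replicate pvQwertyOrder.length ' ')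
  String.mk layout

-- ===== PRECONDITION & SPEC =====
def Spec_convert_moo_to_qwerty_layout (items : String) (positions : String) (out : String) : Prop := out = convert_moo_to_qwerty_layout_alt items positions
instance (items : String) (positions : String) (out : String) : Decidable (Spec_convert_moo_to_qwerty_layout items positions out) := by unfold Spec_convert_moo_to_qwerty_layout; infer_instance

-- ===== CLAIM (what is proved, stated in full; the proofs are below) =====
def Claim_equal_convert_moo_to_qwerty_layout : Prop := ∀ (items : String) (positions : String), Dom_convert_moo_to_qwerty_layout items positions → Spec_convert_moo_to_qwerty_layout items positions (convert_moo_to_qwerty_layout items positions)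

-- ===== LEMMAS AND PROOFS =====

-- B's index dict, as a standalone term (identical to the fold in the port of B).
def pvIdx : PySem.Dict Char Int :=
  (PySem.List.enumerate pvQwertyOrder).foldl (fun m p => m.insert p.2 p.1) PySem.Dict.empty

-- A's gather step applied to a dict d, as a function of d.
def pvGather (d : PySem.Dict Char Char) : List Char :=
  pvQwertyOrder.map (fun q => if d.contains q then d.getD q ' ' else ' ')

lemma pvQwertyOrder_nodup : pvQwertyOrder.Nodup := by decide

-- generic: the enumerate-fold index dict looks up first (= only, when Nodup) index
lemma buildIdx_get? (Q : List Char) (hQ : Q.Nodup) (s : Int) (m : PySem.Dict Char Int) (c : Char) :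
    ((PySem.List.enumerate Q s).foldl (fun m p => m.insert p.2 p.1) m).get? c =
      if c ∈ Q then some (s + (Q.idxOf c : Int)) else m.get? c := by
  induction Q generalizing s m with
  | nil => simp [PySem.List.enumerate]
  | cons x xs ih =>
    obtain ⟨hx, hxs⟩ := List.nodup_cons.mp hQ
    rw [PySem.List.enumerate_cons]
    simp only [List.foldl_cons]
    rw [ih hxs]
    by_cases hc : c ∈ xs
    · have hne : c ≠ x := fun h => hx (h ▸ hc)
      simp [hc, List.mem_cons, hne, hne.symm]
      ring
    · by_cases hcx : c = x
      · subst hcx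
        simp [hc, PySem.Dict.get?_insert_self]
      · simp [hc, hcx, PySem.Dict.get?_insert_of_ne _ _ hcx]

lemma pvIdx_get? (c : Char) :
    pvIdx.get? c = if c ∈ pvQwertyOrder then some ((pvQwertyOrder.idxOf c : Int)) else none := by
  have := buildIdx_get? pvQwertyOrder pvQwertyOrder_nodup 0 PySem.Dict.empty c
  simpa [pvIdx, PySem.Dict.get?_empty] using this

lemma pvIdx_contains (c : Char) :
    pvIdx.contains c = decide (c ∈ pvQwertyOrder) := by
  rw [PySem.Dict.contains_eq_isSome_get?, pvIdx_get?]
  by_cases h : c ∈ pvQwertyOrder <;> simp [h]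

lemma pvIdx_getD (c : Char) (h : c ∈ pvQwertyOrder) :
    pvIdx.getD c 0 = (pvQwertyOrder.idxOf c : Int) := by
  rw [PySem.Dict.getD_eq_get?_getD, pvIdx_get?]
  simp [h]

-- gather over a dict after one insertion = set/skip on the gathered list
lemma gather_insert (d : PySem.Dict Char Char) (p l : Char) :
    pvGather (d.insert p l) =
      if pvIdx.contains p then (pvGather d).set (pvIdx.getD p 0).toNat l else pvGather d := by
  rw [pvIdx_contains]
  by_cases hp : p ∈ pvQwertyOrder
  · simp only [hp, decide_true, if_true]
    rw [pvIdx_getD p hp]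
    have hi : pvQwertyOrder.idxOf p < pvQwertyOrder.length := List.idxOf_lt_length_of_mem hp
    apply List.ext_getElem
    · simp [pvGather]
    · intro j hj hj'
      rw [List.getElem_set]
      simp only [pvGather, List.getElem_map, Int.toNat_natCast]
      by_cases hje : pvQwertyOrder.idxOf p = j
      · subst hje
        have hgp : pvQwertyOrder[pvQwertyOrder.idxOf p] = p := List.getElem_idxOf hi
        simp [hgp]
      · have hne : pvQwertyOrder[j] ≠ p := by
          intro h
          apply hje
          have hgi : pvQwertyOrder[pvQwertyOrder.idxOf p] = p := List.getElem_idxOf hi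
          exact (List.Nodup.getElem_inj_iff pvQwertyOrder_nodup).mp (hgi.trans h.symm)
        rw [if_neg hje, PySem.Dict.contains_insert, PySem.Dict.getD_insert]
        split_ifs with h1 h2 h3 <;>
          first
            | rfl
            | exact absurd h2 hne
            | simp_all
  · simp only [hp, decide_false, Bool.false_eq_true, if_false]
    unfold pvGather
    apply List.map_congr_left
    intro q hq
    have hne : q ≠ p := fun h => hp (h ▸ hq)
    rw [PySem.Dict.contains_insert, PySem.Dict.getD_insert]
    simp [hne]

-- scatter over the pairs = gather over the dict built from the pairs
lemma scatter_eq_gather (pairs : List (Char × Char)) (d : PySem.Dict Char Char) :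
    pairs.foldl
        (fun acc p => if pvIdx.contains p.1 then acc.set (pvIdx.getD p.1 0).toNat p.2 else acc)
        (pvGather d)
      = pvGather (pairs.foldl (fun d p => d.insert p.1 p.2) d) := by
  induction pairs generalizing d with
  | nil => rfl
  | cons p ps ih =>
    simp only [List.foldl_cons]
    rw [← gather_insert, ih]

lemma gather_empty : pvGather PySem.Dict.empty = List.replicate pvQwertyOrder.length ' ' := by
  decide

-- ===== VERDICT (by name: the statement is the Claim_ definition above) =====
theorem convert_moo_to_qwerty_layout_spec : Claim_equal_convert_moo_to_qwerty_layout := by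
  intro items positions _
  show _ = _
  unfold convert_moo_to_qwerty_layout convert_moo_to_qwerty_layout_alt
  simp only []
  rw [PySem.List.foldl_append_singleton_eq_map]
  have h1 : (pvQwertyOrder.map fun q =>
      if ((positions.toList.zip items.toList).foldl (fun d p => d.insert p.1 p.2) PySem.Dict.empty).contains q
      then ((positions.toList.zip items.toList).foldl (fun d p => d.insert p.1 p.2) PySem.Dict.empty).getD q ' '
      else ' ') = pvGather ((positions.toList.zip items.toList).foldl (fun d p => d.insert p.1 p.2) PySem.Dict.empty) := rfl
  rw [h1, ← scatter_eq_gather, gather_empty]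
  rfl
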